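-- pv_equiv track=rewrite | github.com/Emilia0608/CodingStudy | 프로그래머스/2/42584. 주식가격/주식가격.py | solution
-- ===== SOURCE A (Python) =====
-- def solution(prices):
--     not_blue={}
--     for i in range(0, len(prices)):
--         not_blue[i]=0 # 시작시 기본값 1세팅
--         for j in range(i+1, len(prices)):
--             if prices[i]>prices[j]:
--                 not_blue[i]=not_blue.get(i)+1
--                 break
--             else:
--                 not_blue[i]=not_blue.get(i)+1
--     answer=list(not_blue.values())
--     return answer
-- ===== SOURCE B (Python) =====
-- def solution(prices):
--     n = len(prices)
--     answer = [0] * n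
--     stack = []  # indices whose first drop has not been seen yet
--     for j, p in enumerate(prices):
--         while stack and prices[stack[-1]] > p:
--             i = stack.pop()
--             answer[i] = j - i
--         stack.append(j)
--     for i in stack:
--         answer[i] = n - 1 - i
--     return answer
-- ===== Notes on version B (the rewrite author's own statement) =====
-- stated objective: faster
-- what changed: Replaced the per-index rescan of the whole suffix (dict of counters with an inner break loop) by a single left-to-right pass with a monotonic index stack that pops an index exactly when its first lower price appears and records the index distance.
import Mathlib
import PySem

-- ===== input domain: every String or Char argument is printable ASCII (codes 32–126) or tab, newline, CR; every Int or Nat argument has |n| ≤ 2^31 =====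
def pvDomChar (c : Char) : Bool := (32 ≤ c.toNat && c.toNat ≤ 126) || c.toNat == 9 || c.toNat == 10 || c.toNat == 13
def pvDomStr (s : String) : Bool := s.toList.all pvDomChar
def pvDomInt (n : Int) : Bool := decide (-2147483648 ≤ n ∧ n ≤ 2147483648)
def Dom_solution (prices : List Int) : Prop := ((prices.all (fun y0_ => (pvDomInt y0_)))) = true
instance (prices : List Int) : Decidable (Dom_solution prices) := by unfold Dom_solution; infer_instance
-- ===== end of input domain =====

-- B replaces A's quadratic per-index suffix rescan by one linear pass with a monotonic index stack (objective: faster).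

-- ===== PORT A =====
-- inner loop: 'for j in range(i+1, len(prices)): …' with break on the first drop
def solInner (prices : List Int) (i : Int) (js : List Int) (d : PySem.Dict Int Int) : PySem.Dict Int Int :=
  match js with
  | [] => d
  | j :: rest =>
    if PySem.List.pyGetD prices i 0 > PySem.List.pyGetD prices j 0 then
      d.insert i (d.getD i 0 + 1)
    else
      solInner prices i rest (d.insert i (d.getD i 0 + 1))

def solution (prices : List Int) : List Int :=
  let d := (PySem.List.pyRange 0 (PySem.List.len prices) 1).foldl
    (fun d i =>
      solInner prices i (PySem.List.pyRange (i + 1) (PySem.List.len prices) 1) (d.insert i 0))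
    PySem.Dict.empty
  d.values

-- ===== PORT B =====
-- 'while stack and prices[stack[-1]] > p: i = stack.pop(); answer[i] = j - i'
-- (the Python list 'stack' is kept top-first here: stack[-1] is the head, append is cons)
def altPop (prices : List Int) (p j : Int) (stack ans : List Int) : List Int × List Int :=
  match stack with
  | [] => ([], ans)
  | i :: rest =>
    if PySem.List.pyGetD prices i 0 > p then
      altPop prices p j rest (PySem.List.pySetD ans i (j - i))
    else (i :: rest, ans)

def solution_alt (prices : List Int) : List Int :=
  let n := PySem.List.len prices
  let st := (PySem.List.enumerate prices 0).foldl
    (fun (st : List Int × List Int) jp =>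
      let r := altPop prices jp.2 jp.1 st.1 st.2
      (jp.1 :: r.1, r.2))
    ([], List.replicate prices.length 0)
  -- 'for i in stack: answer[i] = n - 1 - i' iterates bottom-to-top, i.e. the reverse of our top-first list
  st.1.reverse.foldl (fun ans i => PySem.List.pySetD ans i (n - 1 - i)) st.2

-- ===== PRECONDITION & SPEC =====
def Spec_solution (prices : List Int) (out : List Int) : Prop := out = solution_alt prices
instance (prices : List Int) (out : List Int) : Decidable (Spec_solution prices out) := by unfold Spec_solution; infer_instance

-- ===== CLAIM (what is proved, stated in full; the proofs are below) =====
def Claim_equal_solution : Prop := ∀ (prices : List Int), Dom_solution prices → Spec_solution prices (solution prices)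

-- ===== LEMMAS AND PROOFS =====

-- the common specification: cnt prices i j = number of indices scanned from j (inclusive) up to and
-- including the first index k ≥ j with prices[k] < prices[i], or up to the end of the list
def cnt (prices : List Int) (i j : Nat) : Int :=
  if _h : j < prices.length then
    (if prices.getD j 0 < prices.getD i 0 then 1 else 1 + cnt prices i (j + 1))
  else 0
termination_by prices.length - j

-- cnt when the first drop below prices[i] is at index m
theorem cnt_of_first_drop (prices : List Int) (i j m : Nat) (hjm : j ≤ m) (hm : m < prices.length)
    (hno : ∀ k, j ≤ k → k < m → ¬(prices.getD k 0 < prices.getD i 0))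
    (hdrop : prices.getD m 0 < prices.getD i 0) :
    cnt prices i j = (m : Int) + 1 - (j : Int) := by
  have key : ∀ (d j : Nat), m - j = d → j ≤ m →
      (∀ k, j ≤ k → k < m → ¬(prices.getD k 0 < prices.getD i 0)) →
      cnt prices i j = (m : Int) + 1 - (j : Int) := by
    intro d
    induction d with
    | zero =>
      intro j h1 h2 _
      have hjm : j = m := by omega
      subst hjm
      rw [cnt, dif_pos hm, if_pos hdrop]
      omega
    | succ d ih =>
      intro j h1 h2 hno'
      have hjm : j < m := by omega
      have hjlen : j < prices.length := by omega
      rw [cnt, dif_pos hjlen, if_neg (hno' j le_rfl hjm),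
        ih (j + 1) (by omega) (by omega) (fun k hk1 hk2 => hno' k (by omega) hk2)]
      push_cast
      ring
  exact key (m - j) j rfl hjm hno

-- cnt when no drop below prices[i] ever occurs from j on
theorem cnt_of_no_drop (prices : List Int) (i j : Nat) (hj : j ≤ prices.length)
    (hno : ∀ k, j ≤ k → k < prices.length → ¬(prices.getD k 0 < prices.getD i 0)) :
    cnt prices i j = (prices.length : Int) - (j : Int) := by
  have key : ∀ (d j : Nat), prices.length - j = d → j ≤ prices.length →
      (∀ k, j ≤ k → k < prices.length → ¬(prices.getD k 0 < prices.getD i 0)) →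
      cnt prices i j = (prices.length : Int) - (j : Int) := by
    intro d
    induction d with
    | zero =>
      intro j h1 h2 _
      have hjm : j = prices.length := by omega
      subst hjm
      rw [cnt, dif_neg (by omega)]
      omega
    | succ d ih =>
      intro j h1 h2 hno'
      have hjlen : j < prices.length := by omega
      rw [cnt, dif_pos hjlen, if_neg (hno' j le_rfl hjlen),
        ih (j + 1) (by omega) (by omega) (fun k hk1 hk2 => hno' k (by omega) hk2)]
      push_cast
      ring
  exact key (prices.length - j) j rfl hj hno

-- ---- A-side ----
theorem solInner_insert (prices : List Int) (i : Nat) :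
    ∀ (j : Nat), ∀ (d : PySem.Dict Int Int) (v : Int),
      solInner prices (i : Int) (PySem.List.pyRange (j : Int) (prices.length : Int) 1) (d.insert (i : Int) v)
        = d.insert (i : Int) (v + cnt prices i j) := by
  have key : ∀ (fuel j : Nat), prices.length - j = fuel → ∀ (d : PySem.Dict Int Int) (v : Int),
      solInner prices (i : Int) (PySem.List.pyRange (j : Int) (prices.length : Int) 1) (d.insert (i : Int) v)
        = d.insert (i : Int) (v + cnt prices i j) := by
    intro fuel
    induction fuel with
    | zero =>
      intro j hfj d v
      rw [PySem.List.pyRange_one_eq_nil (by exact_mod_cast Nat.le_of_sub_eq_zero hfj), solInner,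
        cnt, dif_neg (by omega)]
      norm_num
    | succ fuel ih =>
      intro j hfj d v
      have hjlen : j < prices.length := by omega
      rw [PySem.List.pyRange_one_cons (by exact_mod_cast hjlen), solInner]
      simp only [PySem.List.pyGetD_natCast]
      rw [cnt, dif_pos hjlen]
      by_cases hc : prices.getD j 0 < prices.getD i 0
      · rw [if_pos hc, if_pos hc, PySem.Dict.getD_insert_self, PySem.Dict.insert_insert_self]
      · rw [if_neg hc, if_neg hc, PySem.Dict.getD_insert_self, PySem.Dict.insert_insert_self]
        have : ((j : Int) + 1) = ((j + 1 : Nat) : Int) := by push_cast; ring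
        rw [this, ih (j + 1) (by omega) d (v + 1)]
        ring_nf
  exact fun j => key (prices.length - j) j rfl

theorem solution_eq_map_cnt (prices : List Int) :
    solution prices = (List.range prices.length).map (fun i => cnt prices i (i + 1)) := by
  unfold solution
  simp only [PySem.List.len_eq, PySem.List.pyRange_zero_nat, List.foldl_map]
  rw [PySem.List.foldl_congr_mem _ _
      (fun (d : PySem.Dict Int Int) (i : Nat) => d.insert (i : Int) (0 + cnt prices i (i + 1))) _
      (by
        intro d i _
        have h1 : ((i : Int) + 1) = ((i + 1 : Nat) : Int) := by push_cast; ring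
        rw [h1]
        exact solInner_insert prices i (i + 1) d 0),
    ]
  have hv : ∀ (d : PySem.Dict Int Int), d.values = d.items.map Prod.snd := fun _ => rfl
  rw [hv, PySem.Dict.items_foldl_insert_fresh (List.range prices.length)
      (fun (i : Nat) => (i : Int)) (fun i => 0 + cnt prices i (i + 1)) PySem.Dict.empty
      (by simp) (by exact (List.nodup_range).map (fun a b => by omega))]
  simp [PySem.Dict.empty, Function.comp]

-- ---- B-side ----
def aliveB (prices : List Int) (i j : Nat) : Bool :=
  decide (∀ k, k < j → i < k → prices.getD i 0 ≤ prices.getD k 0)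

def stackOf (prices : List Int) (j : Nat) : List Int :=
  (((List.range j).filter (fun i => aliveB prices i j)).reverse).map (fun (i : Nat) => (i : Int))

def ansOf (prices : List Int) (j : Nat) : List Int :=
  (List.range prices.length).map (fun i => if aliveB prices i j then 0 else cnt prices i (i + 1))

-- writing f i at each index of l, last write wins and every write to i is f i
theorem foldl_pySetD_getElem? (f : Nat → Int) :
    ∀ (l : List Nat) (ans : List Int) (k : Nat),
      (l.foldl (fun a (i : Nat) => PySem.List.pySetD a (↑i : Int) (f i)) ans)[k]?
        = if k ∈ l ∧ k < ans.length then some (f k) else ans[k]? := by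
  intro l
  induction l with
  | nil => intro ans k; simp
  | cons i rest ih =>
    intro ans k
    rw [List.foldl_cons, ih]
    have hlen : (PySem.List.pySetD ans (↑i : Int) (f i)).length = ans.length := by
      simp [PySem.List.pySetD_natCast]
    by_cases hk : k < ans.length
    · by_cases hmem : k ∈ rest
      · simp [hmem, hk, hlen]
      · by_cases hik : i = k
        · subst hik
          simp [hmem, hk, hlen, PySem.List.pySetD_natCast, List.getElem?_set]
        · simp [hmem, hk, hlen, hik, Ne.symm hik, PySem.List.pySetD_natCast,
            List.getElem?_set]
    · have h1 : ans[k]? = none := List.getElem?_eq_none (by omega)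
      have h2 : (PySem.List.pySetD ans (↑i : Int) (f i))[k]? = none :=
        List.getElem?_eq_none (by omega)
      simp [hk, hlen, h1, h2]

theorem takeWhile_eq_filter_of_pairwise {α : Type} (c : α → Bool) :
    ∀ (l : List α), (l.Pairwise (fun a b => c a = false → c b = false)) →
      l.takeWhile c = l.filter c := by
  intro l
  induction l with
  | nil => intro _; rfl
  | cons a rest ih =>
    intro hp
    rcases List.pairwise_cons.mp hp with ⟨hhead, htail⟩
    by_cases hc : c a
    · simp [List.takeWhile_cons, List.filter_cons, hc, ih htail]
    · have : rest.filter c = [] := by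
        refine List.filter_eq_nil_iff.mpr ?_
        intro b hb
        simp [hhead b hb (by simpa using hc)]
      simp [List.takeWhile_cons, List.filter_cons, hc, this]

-- the pop loop is filter + recorded writes, provided failure of the pop test propagates down the stack
theorem altPop_spec (prices : List Int) (p j : Int) :
    ∀ (l : List Nat) (ans : List Int),
      (l.Pairwise (fun a b => ¬(p < prices.getD a 0) → ¬(p < prices.getD b 0))) →
      altPop prices p j (l.map (fun (i : Nat) => (i : Int))) ans
        = ((l.filter (fun i => !decide (p < prices.getD i 0))).map (fun (i : Nat) => (i : Int)),
           (l.takeWhile (fun i => decide (p < prices.getD i 0))).foldl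
             (fun a (i : Nat) => PySem.List.pySetD a (↑i : Int) (j - (↑i : Int))) ans) := by
  intro l
  induction l with
  | nil => intro ans _; rfl
  | cons i rest ih =>
    intro ans hp
    rcases List.pairwise_cons.mp hp with ⟨hhead, htail⟩
    simp only [List.map_cons]
    rw [altPop]
    simp only [PySem.List.pyGetD_natCast, gt_iff_lt]
    by_cases hc : p < prices.getD i 0
    · rw [if_pos hc, ih _ htail]
      have h1 : (i :: rest).filter (fun i => !decide (p < prices.getD i 0))
          = rest.filter (fun i => !decide (p < prices.getD i 0)) := by
        rw [List.filter_cons]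
        simp only [show decide (p < prices.getD i 0) = true from by simpa using hc]
        simp
      have h2 : (i :: rest).takeWhile (fun i => decide (p < prices.getD i 0))
          = i :: rest.takeWhile (fun i => decide (p < prices.getD i 0)) :=
        List.takeWhile_cons_of_pos (by simpa using hc)
      rw [h1, h2, List.foldl_cons]
    · rw [if_neg hc]
      have hfilt : (i :: rest).filter (fun i => !decide (p < prices.getD i 0)) = i :: rest := by
        refine List.filter_eq_self.mpr ?_
        intro b hb
        rcases List.mem_cons.mp hb with h | h
        · subst h
          simpa [List.getD, not_lt] using hc
        · simpa [List.getD, not_lt] using hhead b h hc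
      have htake : (i :: rest).takeWhile (fun i => decide (p < prices.getD i 0)) = [] :=
        List.takeWhile_cons_of_neg (by simpa using hc)
      rw [hfilt, htake]
      rfl

theorem aliveB_ge (prices : List Int) (i j : Nat) (h : j ≤ i + 1) : aliveB prices i j = true := by
  simp only [aliveB, decide_eq_true_eq]
  intro k hk hik
  omega

theorem aliveB_succ_of_lt (prices : List Int) (i j : Nat) (hij : i < j) :
    aliveB prices i (j + 1)
      = (aliveB prices i j && !decide (prices.getD j 0 < prices.getD i 0)) := by
  simp only [aliveB, ← decide_not, ← Bool.decide_and, decide_eq_decide, not_lt]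
  constructor
  · intro h
    exact ⟨fun k hk hik => h k (by omega) hik, h j (by omega) hij⟩
  · intro h k hk hik
    by_cases hkj : k < j
    · exact h.1 k hkj hik
    · have : k = j := by omega
      subst this
      exact h.2

theorem mem_stackList (prices : List Int) (j : Nat) (a : Nat)
    (ha : a ∈ ((List.range j).filter (fun i => aliveB prices i j)).reverse) :
    a < j ∧ aliveB prices a j = true := by
  simp only [List.mem_reverse, List.mem_filter, List.mem_range] at ha
  exact ha

theorem pairwise_stackList (prices : List Int) (j : Nat) (p : Int)
    (hp : p = prices.getD j 0) :
    (((List.range j).filter (fun i => aliveB prices i j)).reverse).Pairwise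
      (fun a b => ¬(p < prices.getD a 0) → ¬(p < prices.getD b 0)) := by
  have hbase : (((List.range j).filter (fun i => aliveB prices i j)).reverse).Pairwise
      (fun a b => b < a) :=
    List.pairwise_reverse.mpr (List.Pairwise.filter _ List.pairwise_lt_range)
  refine hbase.imp_of_mem ?_
  intro a b hma hmb hba hna hcb
  rcases mem_stackList prices j a hma with ⟨haj, _⟩
  rcases mem_stackList prices j b hmb with ⟨_, hbal⟩
  have hle : prices.getD b 0 ≤ prices.getD a 0 := by
    have := (decide_eq_true_eq.mp hbal) a haj hba
    exact this
  exact hna (lt_of_lt_of_le hcb hle)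

theorem fold_step (prices : List Int) (j : Nat) (hj : j < prices.length) :
    (fun (st : List Int × List Int) (jp : Int × Int) =>
        let r := altPop prices jp.2 jp.1 st.1 st.2
        ((jp.1 :: r.1 : List Int), r.2))
      (stackOf prices j, ansOf prices j) ((j : Int), prices.getD j 0)
      = (stackOf prices (j + 1), ansOf prices (j + 1)) := by
  set p := prices.getD j 0 with hp
  set l := ((List.range j).filter (fun i => aliveB prices i j)).reverse with hl
  have hpair := pairwise_stackList prices j p hp
  show ((j : Int) :: (altPop prices p (j : Int) (stackOf prices j) (ansOf prices j)).1,
        (altPop prices p (j : Int) (stackOf prices j) (ansOf prices j)).2)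
      = (stackOf prices (j + 1), ansOf prices (j + 1))
  rw [show stackOf prices j = l.map (fun (i : Nat) => (i : Int)) from rfl,
    altPop_spec prices p (j : Int) l (ansOf prices j) hpair]
  have hstack : (j : Int) :: (l.filter (fun i => !decide (p < prices.getD i 0))).map
      (fun (i : Nat) => (i : Int)) = stackOf prices (j + 1) := by
    have hc1 : ((List.range (j + 1)).filter (fun i => aliveB prices i (j + 1)))
        = ((List.range j).filter (fun i => aliveB prices i (j + 1))) ++ [j] := by
      rw [List.range_succ, List.filter_append]
      simp [aliveB_ge prices j (j + 1) le_rfl]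
    have hc2 : (List.range j).filter (fun i => aliveB prices i (j + 1))
        = ((List.range j).filter (fun i => aliveB prices i j)).filter
            (fun i => !decide (p < prices.getD i 0)) := by
      rw [List.filter_filter]
      refine (List.filter_congr ?_).symm
      intro x hx
      rw [aliveB_succ_of_lt prices x j (List.mem_range.mp hx), Bool.and_comm, hp]
    rw [stackOf, hc1, hc2, List.reverse_append]
    simp only [List.reverse_singleton, List.singleton_append, List.map_cons]
    have hr : (((List.range j).filter (fun i => aliveB prices i j)).filter
          (fun i => !decide (p < prices.getD i 0))).reverse
        = l.filter (fun i => !decide (p < prices.getD i 0)) := by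
      rw [hl, List.filter_reverse]
    rw [hr]
  have hans : (l.takeWhile (fun i => decide (p < prices.getD i 0))).foldl
      (fun a (i : Nat) => PySem.List.pySetD a (↑i : Int) ((j : Int) - (↑i : Int))) (ansOf prices j)
      = ansOf prices (j + 1) := by
    rw [takeWhile_eq_filter_of_pairwise _ l
      (hpair.imp_of_mem (by
        intro a b _ _ h ha
        simp only [decide_eq_false_iff_not] at *
        exact h ha))]
    refine List.ext_getElem? ?_
    intro k
    have hfold := foldl_pySetD_getElem? (fun i : Nat => (j : Int) - (i : Int))
      (l.filter (fun i => decide (p < prices.getD i 0))) (ansOf prices j) k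
    rw [hfold]
    have hlen : (ansOf prices j).length = prices.length := by simp [ansOf]
    by_cases hkn : k < prices.length
    · have hrhs : (ansOf prices (j + 1))[k]?
          = some (if aliveB prices k (j + 1) then 0 else cnt prices k (k + 1)) := by
        simp [ansOf, hkn]
      have hlhs0 : (ansOf prices j)[k]?
          = some (if aliveB prices k j then 0 else cnt prices k (k + 1)) := by
        simp [ansOf, hkn]
      by_cases hmem : k ∈ l.filter (fun i => decide (p < prices.getD i 0))
      · rcases List.mem_filter.mp hmem with ⟨hkl, hck⟩
        rcases mem_stackList prices j k hkl with ⟨hkj, hkal⟩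
        have hdrop : prices.getD j 0 < prices.getD k 0 := by
          rw [hp] at hck
          exact decide_eq_true_eq.mp hck
        have hnotalive : aliveB prices k (j + 1) = false := by
          rw [aliveB_succ_of_lt prices k j hkj, hkal,
            show decide (prices.getD j 0 < prices.getD k 0) = true from decide_eq_true_eq.mpr hdrop]
          rfl
        have hcnt : cnt prices k (k + 1) = (j : Int) - (k : Int) := by
          have := cnt_of_first_drop prices k (k + 1) j (by omega) hj
            (fun k' h1 h2 => by
              have := (decide_eq_true_eq.mp hkal) k' (by omega) (by omega)
              omega)
            hdrop
          rw [this]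
          push_cast
          ring
        rw [if_pos ⟨hmem, by omega⟩, hrhs, hnotalive]
        simp [hcnt]
      · rw [if_neg (by tauto), hrhs, hlhs0]
        have halive_eq : aliveB prices k (j + 1) = aliveB prices k j := by
          by_cases hkj : k < j
          · rw [aliveB_succ_of_lt prices k j hkj]
            by_cases hal : aliveB prices k j = true
            · rw [hal]
              have hnd : ¬ (prices.getD j 0 < prices.getD k 0) := by
                intro hdrop
                exact hmem (List.mem_filter.mpr ⟨by
                    simp only [hl, List.mem_reverse, List.mem_filter, List.mem_range]
                    exact ⟨hkj, hal⟩,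
                  by rw [hp]; exact decide_eq_true_eq.mpr hdrop⟩)
              rw [show decide (prices.getD j 0 < prices.getD k 0) = false from
                decide_eq_false_iff_not.mpr hnd]
              rfl
            · simp [Bool.eq_false_iff.mpr hal]
          · rw [aliveB_ge prices k (j + 1) (by omega), aliveB_ge prices k j (by omega)]
        rw [halive_eq]
    · have hrhs0 : (ansOf prices (j + 1))[k]? = none := by
        simp [ansOf, hkn]
      have hlhs1 : (ansOf prices j)[k]? = none := by
        simp [ansOf, hkn]
      rw [if_neg (by rw [hlen]; tauto), hrhs0, hlhs1]
  rw [hstack, hans]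

theorem fold_prefix (prices : List Int) :
    ∀ (j : Nat), j ≤ prices.length →
      ((PySem.List.enumerate (prices.take j) 0).foldl
        (fun (st : List Int × List Int) jp =>
          let r := altPop prices jp.2 jp.1 st.1 st.2
          ((jp.1 :: r.1 : List Int), r.2))
        ([], List.replicate prices.length 0))
      = (stackOf prices j, ansOf prices j) := by
  intro j
  induction j with
  | zero =>
    intro _
    have hans0 : ansOf prices 0 = List.replicate prices.length 0 := by
      refine List.ext_getElem? fun k => ?_
      by_cases hk : k < prices.length
      · simp [ansOf, aliveB_ge prices k 0 (by omega), hk]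
      · simp [ansOf, hk]
    rw [← hans0]
    rfl
  | succ j ih =>
    intro hj1
    have hj : j < prices.length := by omega
    have htake : prices.take (j + 1) = prices.take j ++ [prices[j]'hj] := by
      rw [List.take_add_one, List.getElem?_eq_getElem hj]
      rfl
    rw [htake, PySem.List.enumerate_append, List.foldl_append, ih (by omega)]
    have hlen : (prices.take j).length = j := by simp [List.length_take]; omega
    rw [hlen]
    have henum : PySem.List.enumerate [prices[j]'hj] (0 + (j : Int)) = [((j : Int), prices[j]'hj)] := by
      simp [PySem.List.enumerate_cons, PySem.List.enumerate_nil]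
    rw [henum, List.foldl_cons, List.foldl_nil]
    have hgd : prices[j]'hj = prices.getD j 0 := (List.getD_eq_getElem prices 0 hj).symm
    rw [hgd]
    exact fold_step prices j hj

theorem solution_alt_eq_map_cnt (prices : List Int) :
    solution_alt prices = (List.range prices.length).map (fun i => cnt prices i (i + 1)) := by
  unfold solution_alt
  simp only [PySem.List.len_eq]
  have h1 := fold_prefix prices prices.length le_rfl
  rw [List.take_length] at h1
  rw [h1]
  have hrev : (stackOf prices prices.length).reverse
      = ((List.range prices.length).filter (fun i => aliveB prices i prices.length)).map
          (fun (i : Nat) => (i : Int)) := by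
    rw [stackOf, List.map_reverse, List.reverse_reverse]
  rw [hrev, List.foldl_map]
  refine List.ext_getElem? fun k => ?_
  have hfold := foldl_pySetD_getElem? (fun i : Nat => (prices.length : Int) - 1 - (i : Int))
    ((List.range prices.length).filter (fun i => aliveB prices i prices.length))
    (ansOf prices prices.length) k
  rw [show (((List.range prices.length).filter (fun i => aliveB prices i prices.length)).foldl
      (fun ans (i : Nat) => PySem.List.pySetD ans (↑i : Int) ((prices.length : Int) - 1 - (↑i : Int)))
      (ansOf prices prices.length))[k]?
      = if k ∈ (List.range prices.length).filter (fun i => aliveB prices i prices.length) ∧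
          k < (ansOf prices prices.length).length
        then some ((prices.length : Int) - 1 - (k : Int))
        else (ansOf prices prices.length)[k]? from hfold]
  have hlen : (ansOf prices prices.length).length = prices.length := by simp [ansOf]
  by_cases hkn : k < prices.length
  · by_cases hmem : k ∈ (List.range prices.length).filter (fun i => aliveB prices i prices.length)
    · rcases List.mem_filter.mp hmem with ⟨_, hal⟩
      have hcnt : cnt prices k (k + 1) = (prices.length : Int) - 1 - (k : Int) := by
        rw [cnt_of_no_drop prices k (k + 1) (by omega)
          (fun k' h1 h2 => by
            have := (decide_eq_true_eq.mp hal) k' (by omega) (by omega)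
            omega)]
        push_cast
        ring
      rw [if_pos ⟨hmem, by omega⟩]
      simp [hkn, hcnt]
    · rw [if_neg (by tauto)]
      have hnal : aliveB prices k prices.length = false := by
        by_cases h : aliveB prices k prices.length = true
        · exact absurd (List.mem_filter.mpr ⟨List.mem_range.mpr hkn, h⟩) hmem
        · simpa using h
      simp [ansOf, hkn, hnal]
  · rw [if_neg (by rw [hlen]; tauto)]
    simp [ansOf, hkn]

-- ===== VERDICT (by name: the statement is the Claim_ definition above) =====
theorem solution_spec : Claim_equal_solution := by
  intro prices _
  unfold Spec_solution
  rw [solution_eq_map_cnt, solution_alt_eq_map_cnt]
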